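-- pv_equiv track=rewrite | github.com/trac3er00/OMG | runtime/install_planner.py | _apply_codex_stdio
-- ===== SOURCE A (Python) =====
-- def _codex_header_candidates(server_name: str) -> set[str]:
--     return {
--         f"[mcp_servers.{server_name}]",
--         f"[mcp_servers.\"{server_name}\"]",
--     }
--
-- def _replace_codex_block(existing: str, block: list[str], server_name: str) -> str:
--     lines = existing.splitlines(keepends=True)
--     headers = _codex_header_candidates(server_name)
--     start_idx: int | None = None
--     for idx, line in enumerate(lines):
--         if line.strip() in headers:
--             start_idx = idx
--             break
--
--     if start_idx is None:
--         if existing and not existing.endswith("\n"):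
--             existing += "\n"
--         return existing + "".join(block)
--
--     end_idx = len(lines)
--     for idx in range(start_idx + 1, len(lines)):
--         stripped = lines[idx].strip()
--         if stripped.startswith("[") and stripped.endswith("]"):
--             end_idx = idx
--             break
--
--     return "".join(lines[:start_idx] + block + lines[end_idx:])
--
-- def _toml_quote(value: str) -> str:
--     escaped = value.replace("\\", "\\\\")
--     escaped = escaped.replace('"', '\\"')
--     return escaped
--
-- def _apply_codex_stdio(existing: str, command: str, args: list[str], server_name: str) -> str:
--     args_text = ", ".join(f'"{_toml_quote(arg)}"' for arg in args)
--     block = [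
--         f"[mcp_servers.{server_name}]\n",
--         f'command = "{_toml_quote(command)}"\n',
--         f"args = [{args_text}]\n",
--         "\n",
--     ]
--     return _replace_codex_block(existing, block, server_name)
-- ===== SOURCE B (Python) =====
-- def _toml_quote(value: str) -> str:
--     escaped = value.replace("\\", "\\\\")
--     escaped = escaped.replace('"', '\\"')
--     return escaped
--
-- def _apply_codex_stdio(existing: str, command: str, args: list[str], server_name: str) -> str:
--     args_text = ", ".join(f'"{_toml_quote(arg)}"' for arg in args)
--     block = (
--         f"[mcp_servers.{server_name}]\n"
--         f'command = "{_toml_quote(command)}"\n'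
--         f"args = [{args_text}]\n"
--         "\n"
--     )
--     headers = (f"[mcp_servers.{server_name}]", f'[mcp_servers."{server_name}"]')
--     out = []
--     state = 0  # 0: header not seen yet, 1: skipping the old block, 2: past it
--     for line in existing.splitlines(keepends=True):
--         stripped = line.strip()
--         if state == 0:
--             if stripped in headers:
--                 out.append(block)
--                 state = 1
--             else:
--                 out.append(line)
--         elif state == 1:
--             if stripped.startswith("[") and stripped.endswith("]"):
--                 out.append(line)
--                 state = 2
--         else:
--             out.append(line)
--     if state == 0:
--         if existing and not existing.endswith("\n"):
--             out.append("\n")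
--         out.append(block)
--     return "".join(out)
-- ===== Notes on version B (the rewrite author's own statement) =====
-- stated objective: alternative
-- what changed: A finds the header index and the next-section index with two separate scans and splices lines[:start]+block+lines[end:]; B makes a single pass over the lines with a copy/skip/copy state machine that emits the output as it goes and falls back to append only if no header was ever seen.
import Mathlib
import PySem

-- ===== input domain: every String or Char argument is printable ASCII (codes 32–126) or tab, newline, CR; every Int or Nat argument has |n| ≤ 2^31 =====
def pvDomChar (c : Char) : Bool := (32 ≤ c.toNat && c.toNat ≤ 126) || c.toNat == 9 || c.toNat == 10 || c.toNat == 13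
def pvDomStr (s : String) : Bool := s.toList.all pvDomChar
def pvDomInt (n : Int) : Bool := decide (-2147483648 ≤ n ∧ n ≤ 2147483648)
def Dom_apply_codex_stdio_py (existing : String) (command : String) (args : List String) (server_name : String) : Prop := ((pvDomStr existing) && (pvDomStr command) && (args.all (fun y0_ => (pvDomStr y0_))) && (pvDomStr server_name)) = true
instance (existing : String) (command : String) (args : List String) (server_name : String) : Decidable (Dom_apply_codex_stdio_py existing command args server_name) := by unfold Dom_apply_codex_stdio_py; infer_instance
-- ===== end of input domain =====

-- B replaces A's two separate index scans + list splice with a single-pass state machine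
-- over the lines (copy / replace-and-skip / copy-rest); same cost, different decomposition.

-- ===== PORT A =====
-- helpers shared letter-for-letter by both Pythons (same f-string literals, same _toml_quote body)
def pvTomlQuote (v : List Char) : List Char :=
  PySem.Chars.replace (PySem.Chars.replace v "\\".toList "\\\\".toList) "\"".toList "\\\"".toList

def pvHeader1 (sn : List Char) : List Char := "[mcp_servers.".toList ++ sn ++ "]".toList
def pvHeader2 (sn : List Char) : List Char := "[mcp_servers.\"".toList ++ sn ++ "\"]".toList

def pvArgsText (args : List (List Char)) : List Char :=
  PySem.Chars.join ", ".toList (args.map (fun a => "\"".toList ++ pvTomlQuote a ++ "\"".toList))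

-- str.splitlines(keepends=True), ported by hand (exact on Dom: the only line
-- terminators of printable-ASCII + tab/LF/CR text are '\n', '\r' and '\r\n').
def pvBreakLine : List Char → List Char × List Char
  | [] => ([], [])
  | c :: rest =>
    if c = '\n' then ([c], rest)
    else if c = '\r' then
      match rest with
      | '\n' :: rest' => (['\r', '\n'], rest')
      | _ => (['\r'], rest)
    else
      let p := pvBreakLine rest
      (c :: p.1, p.2)

theorem pvBreakLine_flatten (cs : List Char) :
    (pvBreakLine cs).1 ++ (pvBreakLine cs).2 = cs := by
  induction cs with
  | nil => rfl
  | cons c rest ih =>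
    simp only [pvBreakLine]
    split_ifs with h1 h2
    · simp [h1]
    · cases rest with
      | nil => simp [h2]
      | cons d rest' =>
        by_cases hd : d = '\n'
        · simp [h2, hd]
        · have : (match d :: rest' with
              | '\n' :: rest' => (['\r', '\n'], rest')
              | x => (['\r'], d :: rest')) = (['\r'], d :: rest') := by
            split <;> simp_all
          rw [this]; simp [h2]
    · simpa using ih

theorem pvBreakLine_fst_pos (c : Char) (rest : List Char) :
    0 < (pvBreakLine (c :: rest)).1.length := by
  simp only [pvBreakLine]
  split_ifs with h1 h2
  · simp
  · split <;> simp
  · simp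

theorem pvBreakLine_snd_lt (c : Char) (rest : List Char) :
    (pvBreakLine (c :: rest)).2.length < (c :: rest).length := by
  have hf := pvBreakLine_flatten (c :: rest)
  have := congrArg List.length hf
  simp only [List.length_append] at this
  have := pvBreakLine_fst_pos c rest
  omega

def pvSplitlinesKeep : List Char → List (List Char)
  | [] => []
  | c :: rest =>
    let p := pvBreakLine (c :: rest)
    p.1 :: pvSplitlinesKeep p.2
  termination_by l => l.length
  decreasing_by exact pvBreakLine_snd_lt c rest

-- '{a, b}' set literal of the two header candidates
def pvCodexHeaderCandidates (sn : List Char) : PySem.Set (List Char) :=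
  PySem.Set.ofList [pvHeader1 sn, pvHeader2 sn]

-- 'for idx, line in enumerate(lines): if line.strip() in headers: start_idx = idx; break'
def pvFindStart (hs : PySem.Set (List Char)) : List (List Char) → Nat → Option Nat
  | [], _ => none
  | l :: rest, idx =>
    if PySem.Chars.strip l ∈ hs then some idx else pvFindStart hs rest (idx + 1)

-- 'for idx in range(start_idx + 1, len(lines)): … break'
def pvIsSection (line : List Char) : Bool :=
  let stripped := PySem.Chars.strip line
  PySem.Chars.startswith stripped "[".toList && PySem.Chars.endswith stripped "]".toList

def pvFindEnd : List (List Char) → Nat → Option Nat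
  | [], _ => none
  | l :: rest, idx => if pvIsSection l then some idx else pvFindEnd rest (idx + 1)

def pvReplaceCodexBlock (existing : List Char) (block : List (List Char)) (sn : List Char) : List Char :=
  let lines := pvSplitlinesKeep existing
  let headers := pvCodexHeaderCandidates sn
  match pvFindStart headers lines 0 with
  | none =>
    let existing' :=
      if existing ≠ [] ∧ ¬ PySem.Chars.endswith existing "\n".toList
      then existing ++ "\n".toList else existing
    existing' ++ block.flatten          -- ''.join(block): empty separator, exact
  | some s =>
    let e := (pvFindEnd (lines.drop (s + 1)) (s + 1)).getD lines.length
    (lines.take s ++ block ++ lines.drop e).flatten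

def apply_codex_stdio_py (existing : String) (command : String) (args : List String) (server_name : String) : String :=
  let sn := server_name.toList
  let block : List (List Char) :=
    [ pvHeader1 sn ++ "\n".toList,
      "command = \"".toList ++ pvTomlQuote command.toList ++ "\"\n".toList,
      "args = [".toList ++ pvArgsText (args.map (·.toList)) ++ "]\n".toList,
      "\n".toList ]
  String.ofList (pvReplaceCodexBlock existing.toList block sn)

-- ===== PORT B =====
-- one fold step of B's state machine: state 0 = header not seen, 1 = skipping old block, 2 = past it
def pvStepB (sn : List Char) (block : List Char)
    (acc : List (List Char) × Nat) (line : List Char) : List (List Char) × Nat :=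
  let stripped := PySem.Chars.strip line
  if acc.2 = 0 then
    if [pvHeader1 sn, pvHeader2 sn].contains stripped then (acc.1 ++ [block], 1)
    else (acc.1 ++ [line], 0)
  else if acc.2 = 1 then
    if PySem.Chars.startswith stripped "[".toList && PySem.Chars.endswith stripped "]".toList
    then (acc.1 ++ [line], 2) else acc
  else (acc.1 ++ [line], 2)

def apply_codex_stdio_py_alt (existing : String) (command : String) (args : List String) (server_name : String) : String :=
  let sn := server_name.toList
  let block : List Char :=
    pvHeader1 sn ++ "\n".toList
      ++ ("command = \"".toList ++ pvTomlQuote command.toList ++ "\"\n".toList)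
      ++ ("args = [".toList ++ pvArgsText (args.map (·.toList)) ++ "]\n".toList)
      ++ "\n".toList
  let r := (pvSplitlinesKeep existing.toList).foldl (pvStepB sn block) ([], 0)
  let out :=
    if r.2 = 0 then
      (if existing.toList ≠ [] ∧ ¬ PySem.Chars.endswith existing.toList "\n".toList
       then r.1 ++ ["\n".toList] else r.1) ++ [block]
    else r.1
  String.ofList out.flatten                 -- ''.join(out): empty separator, exact

-- ===== PRECONDITION & SPEC =====
def Spec_apply_codex_stdio_py (existing : String) (command : String) (args : List String) (server_name : String) (out : String) : Prop := out = apply_codex_stdio_py_alt existing command args server_name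
instance (existing : String) (command : String) (args : List String) (server_name : String) (out : String) : Decidable (Spec_apply_codex_stdio_py existing command args server_name out) := by unfold Spec_apply_codex_stdio_py; infer_instance

-- ===== CLAIM (what is proved, stated in full; the proofs are below) =====
def Claim_equal_apply_codex_stdio_py : Prop := ∀ (existing : String) (command : String) (args : List String) (server_name : String), Dom_apply_codex_stdio_py existing command args server_name → Spec_apply_codex_stdio_py existing command args server_name (apply_codex_stdio_py existing command args server_name)

-- ===== LEMMAS AND PROOFS =====

theorem pvMemCand_iff (sn l : List Char) :
    PySem.Chars.strip l ∈ pvCodexHeaderCandidates sn ↔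
      [pvHeader1 sn, pvHeader2 sn].contains (PySem.Chars.strip l) = true := by
  simp [pvCodexHeaderCandidates, PySem.Set.mem_ofList]

theorem pvFindStart_none (hs : PySem.Set (List Char)) (ls : List (List Char)) (i : Nat)
    (h : pvFindStart hs ls i = none) : ∀ l ∈ ls, ¬ PySem.Chars.strip l ∈ hs := by
  induction ls generalizing i with
  | nil => simp
  | cons x rest ih =>
    simp only [pvFindStart] at h
    split_ifs at h with hx
    intro l hl
    rcases List.mem_cons.mp hl with h1 | h1
    · subst h1; exact hx
    · exact ih (i + 1) h l h1

theorem pvFindStart_some (hs : PySem.Set (List Char)) (ls : List (List Char)) (i s : Nat)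
    (h : pvFindStart hs ls i = some s) :
    ∃ pre hd post, ls = pre ++ hd :: post ∧ s = i + pre.length ∧
      (∀ l ∈ pre, ¬ PySem.Chars.strip l ∈ hs) ∧ PySem.Chars.strip hd ∈ hs := by
  induction ls generalizing i with
  | nil => simp [pvFindStart] at h
  | cons x rest ih =>
    simp only [pvFindStart] at h
    split_ifs at h with hx
    · refine ⟨[], x, rest, rfl, ?_, by simp, hx⟩
      have : i = s := by injection h
      simp [this]
    · obtain ⟨pre, hd, post, h1, h2, h3, h4⟩ := ih (i + 1) h
      refine ⟨x :: pre, hd, post, by simp [h1], ?_, ?_, h4⟩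
      · simp only [List.length_cons]; omega
      · intro l hl
        rcases List.mem_cons.mp hl with hm | hm
        · subst hm; exact hx
        · exact h3 l hm
theorem pvFindEnd_eq (ls : List (List Char)) (i : Nat) :
    pvFindEnd ls i = Option.map (i + ·) (ls.findIdx? pvIsSection) := by
  induction ls generalizing i with
  | nil => simp [pvFindEnd]
  | cons x rest ih =>
    simp only [pvFindEnd, List.findIdx?_cons]
    by_cases hx : pvIsSection x
    · simp [hx]
    · simp only [hx, Bool.false_eq_true, reduceIte, ih (i + 1)]
      cases rest.findIdx? pvIsSection <;> simp <;> omega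
theorem pvFoldB_state0 (sn : List Char) (b : List Char) (ls : List (List Char))
    (acc : List (List Char))
    (h : ∀ l ∈ ls, [pvHeader1 sn, pvHeader2 sn].contains (PySem.Chars.strip l) = false) :
    ls.foldl (pvStepB sn b) (acc, 0) = (acc ++ ls, 0) := by
  induction ls generalizing acc with
  | nil => simp
  | cons x rest ih =>
    have hx := h x (by simp)
    simp only [List.foldl_cons, pvStepB, hx]
    simp only [if_pos rfl, Bool.false_eq_true, reduceIte]
    rw [ih (acc ++ [x]) (fun l hl => h l (by simp [hl]))]
    simp

theorem pvFoldB_state2 (sn : List Char) (b : List Char) (ls : List (List Char))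
    (acc : List (List Char)) :
    ls.foldl (pvStepB sn b) (acc, 2) = (acc ++ ls, 2) := by
  induction ls generalizing acc with
  | nil => simp
  | cons x rest ih =>
    simp only [List.foldl_cons, pvStepB]
    norm_num
    rw [ih (acc ++ [x])]
    simp

theorem pvFoldB_state1 (sn : List Char) (b : List Char) (ls : List (List Char))
    (acc : List (List Char)) :
    ls.foldl (pvStepB sn b) (acc, 1) =
      match ls.findIdx? pvIsSection with
      | none => (acc, 1)
      | some k => (acc ++ ls.drop k, 2) := by
  induction ls generalizing acc with
  | nil => simp
  | cons x rest ih =>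
    simp only [List.foldl_cons, List.findIdx?_cons]
    by_cases hx : pvIsSection x
    · have hx' := hx
      simp only [pvIsSection] at hx'
      simp only [pvStepB, hx']
      norm_num
      rw [pvFoldB_state2]
      simp [hx]
    · have hx' : (PySem.Chars.startswith (PySem.Chars.strip x) "[".toList &&
          PySem.Chars.endswith (PySem.Chars.strip x) "]".toList) = false := by
        simpa [pvIsSection] using hx
      simp only [pvStepB, hx']
      norm_num
      rw [ih acc]
      simp only [hx, Bool.false_eq_true, reduceIte]
      cases rest.findIdx? pvIsSection <;> simp
theorem pvSplitlinesKeep_flatten (cs : List Char) :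
    (pvSplitlinesKeep cs).flatten = cs := by
  induction cs using pvSplitlinesKeep.induct with
  | case1 => simp [pvSplitlinesKeep]
  | case2 c rest p ih =>
    rw [pvSplitlinesKeep]
    simp only [List.flatten_cons]
    rw [ih]
    exact pvBreakLine_flatten (c :: rest)


theorem pvCore (cs sn : List Char) (blockA : List (List Char)) (blockB : List Char)
    (hB : blockA.flatten = blockB) :
    pvReplaceCodexBlock cs blockA sn =
      (let r := (pvSplitlinesKeep cs).foldl (pvStepB sn blockB) ([], 0)
       let out :=
         if r.2 = 0 then
           (if cs ≠ [] ∧ ¬ PySem.Chars.endswith cs "\n".toList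
            then r.1 ++ ["\n".toList] else r.1) ++ [blockB]
         else r.1
       out.flatten) := by
  simp only [pvReplaceCodexBlock]
  cases hfs : pvFindStart (pvCodexHeaderCandidates sn) (pvSplitlinesKeep cs) 0 with
  | none =>
    have hall := pvFindStart_none _ _ _ hfs
    have hall' : ∀ l ∈ pvSplitlinesKeep cs,
        [pvHeader1 sn, pvHeader2 sn].contains (PySem.Chars.strip l) = false := by
      intro l hl
      have := hall l hl
      rw [pvMemCand_iff] at this
      exact Bool.not_eq_true _ ▸ eq_false_of_ne_true this
    rw [pvFoldB_state0 sn blockB _ _ hall']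
    simp only [List.nil_append, reduceIte]
    split_ifs with hc
    · simp [List.flatten_append, pvSplitlinesKeep_flatten, hB]
    · simp [List.flatten_append, pvSplitlinesKeep_flatten, hB]
  | some s =>
    obtain ⟨pre, hd, post, hls, hsv, hpre, hhd⟩ := pvFindStart_some _ _ _ _ hfs
    simp only [Nat.zero_add] at hsv
    have hpre' : ∀ l ∈ pre,
        [pvHeader1 sn, pvHeader2 sn].contains (PySem.Chars.strip l) = false := by
      intro l hl
      have := hpre l hl
      rw [pvMemCand_iff] at this
      exact Bool.not_eq_true _ ▸ eq_false_of_ne_true this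
    have hhd' : [pvHeader1 sn, pvHeader2 sn].contains (PySem.Chars.strip hd) = true :=
      (pvMemCand_iff sn hd).mp hhd
    have hassoc : pre ++ hd :: post = (pre ++ [hd]) ++ post := by simp
    have hdrop1 : (pvSplitlinesKeep cs).drop (s + 1) = post := by
      rw [hls, hassoc]
      exact List.drop_left' (by simp [hsv])
    have htake : (pvSplitlinesKeep cs).take s = pre := by
      rw [hls]; exact List.take_left' hsv.symm
    -- B-side fold
    dsimp only
    have hfold : (pvSplitlinesKeep cs).foldl (pvStepB sn blockB) ([], 0) =
        post.foldl (pvStepB sn blockB) (pre ++ [blockB], 1) := by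
      rw [hls, hassoc, List.foldl_append]
      rw [show (pre ++ [hd]).foldl (pvStepB sn blockB) ([], 0) = (pre ++ [blockB], 1) from by
        rw [List.foldl_append, pvFoldB_state0 sn blockB pre [] hpre']
        simp only [List.nil_append, List.foldl_cons, List.foldl_nil, pvStepB, hhd']
        simp]
    rw [hdrop1, pvFindEnd_eq, hfold, pvFoldB_state1]
    cases hfi : post.findIdx? pvIsSection with
    | none =>
      simp only [Option.map_none, Option.getD_none]
      rw [htake, hls]
      simp [List.flatten_append, hB, List.drop_length]
    | some k =>
      simp only [Option.map_some, Option.getD_some]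
      rw [htake]
      have hdrop2 : (pvSplitlinesKeep cs).drop (s + 1 + k) = post.drop k := by
        rw [hls, hassoc, List.drop_append]
        rw [List.drop_of_length_le (by simp [hsv])]
        simp [hsv]
      rw [hdrop2]
      simp [List.flatten_append, hB]

-- ===== VERDICT (by name: the statement is the Claim_ definition above) =====
theorem apply_codex_stdio_py_spec : Claim_equal_apply_codex_stdio_py := by
  intro existing command args server_name _
  unfold Spec_apply_codex_stdio_py apply_codex_stdio_py apply_codex_stdio_py_alt
  dsimp only
  have h := pvCore existing.toList server_name.toList
      [ pvHeader1 server_name.toList ++ "\n".toList,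
        "command = \"".toList ++ pvTomlQuote command.toList ++ "\"\n".toList,
        "args = [".toList ++ pvArgsText (args.map (·.toList)) ++ "]\n".toList,
        "\n".toList ]
      (pvHeader1 server_name.toList ++ "\n".toList
        ++ ("command = \"".toList ++ pvTomlQuote command.toList ++ "\"\n".toList)
        ++ ("args = [".toList ++ pvArgsText (args.map (·.toList)) ++ "]\n".toList)
        ++ "\n".toList)
      (by simp [List.append_assoc])
  rw [h]
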